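-- pv_equiv track=rewrite | github.com/PhyllisWong/teamTH | other_challenges.py | answer
-- ===== SOURCE A (Python) =====
-- def answer(name):
--     abb_name_list = []
--     name_list = name.split()
--
--     for i in range(len(name_list)):
--         if i != 0 and i != len(name_list)-1:
--             abb_name_list.append(name_list[i][0] + ".")
--         else:
--             abb_name_list.append(name_list[i])
--
--     return " ".join(abb_name_list)
-- ===== SOURCE B (Python) =====
-- def _abbrev(ws):
--     # keep the final word; every word before it becomes an initial
--     if len(ws) <= 1:
--         return ws
--     return [ws[0][0] + "."] + _abbrev(ws[1:])
--
--
-- def answer(name):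
--     words = name.split()
--     if not words:
--         return ""
--     return " ".join([words[0]] + _abbrev(words[1:]))
-- ===== Notes on version B (the rewrite author's own statement) =====
-- stated objective: alternative
-- what changed: Replaces A's index-testing loop over range(len) with a recursive decomposition: peel off the first word, then a recursive helper abbreviates each remaining word until only the final word is left, with no indices or length comparisons.
import Mathlib
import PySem

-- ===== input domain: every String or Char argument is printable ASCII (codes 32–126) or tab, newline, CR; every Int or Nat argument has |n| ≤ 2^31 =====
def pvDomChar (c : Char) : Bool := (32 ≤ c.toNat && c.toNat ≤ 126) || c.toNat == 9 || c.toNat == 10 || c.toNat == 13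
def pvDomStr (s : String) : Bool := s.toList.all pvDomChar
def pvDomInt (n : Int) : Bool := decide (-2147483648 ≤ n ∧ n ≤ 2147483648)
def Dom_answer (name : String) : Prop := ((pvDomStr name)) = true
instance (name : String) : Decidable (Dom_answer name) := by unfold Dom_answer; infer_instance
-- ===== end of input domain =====

-- B replaces A's index-testing loop with a recursive decomposition: peel off the first word,
-- then a recursive helper abbreviates each word until only the final word remains; objective: alternative.
-- Both ports work on name.toList via PySem.Chars (exact thin wrappers of the Str operations).

-- ===== PORT A =====
def answer (name : String) : String :=
  let nameList := PySem.Chars.split₀ name.toList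
  let abbNameList := (PySem.List.pyRange 0 (nameList.length : Int)).foldl
    (fun acc i =>
      if i ≠ 0 ∧ i ≠ (nameList.length : Int) - 1 then
        acc ++ [PySem.List.pyGetD (PySem.List.pyGetD nameList i []) 0 ' ' :: ['.']]
      else
        acc ++ [PySem.List.pyGetD nameList i []])
    []
  String.ofList (PySem.Chars.join [' '] abbNameList)

-- ===== PORT B =====
-- helper: abbreviate every word to its initial + '.', keeping only the final word intact
def abbrevRec : List (List Char) → List (List Char)
  | [] => []
  | [w] => [w]
  | w :: rest => (PySem.List.pyGetD w 0 ' ' :: ['.']) :: abbrevRec rest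

def answer_alt (name : String) : String :=
  match PySem.Chars.split₀ name.toList with
  | [] => ""
  | head :: rest => String.ofList (PySem.Chars.join [' '] (head :: abbrevRec rest))

-- ===== PRECONDITION & SPEC =====
def Spec_answer (name : String) (out : String) : Prop := out = answer_alt name
instance (name : String) (out : String) : Decidable (Spec_answer name out) := by unfold Spec_answer; infer_instance

-- ===== CLAIM (what is proved, stated in full; the proofs are below) =====
def Claim_equal_answer : Prop := ∀ (name : String), Dom_answer name → Spec_answer name (answer name)

-- ===== LEMMAS AND PROOFS =====

theorem abbrevRec_length (ws : List (List Char)) : (abbrevRec ws).length = ws.length := by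
  induction ws with
  | nil => rfl
  | cons w rest ih =>
    cases rest with
    | nil => rfl
    | cons v t => simp [abbrevRec] at ih ⊢; omega

theorem abbrevRec_getElem (ws : List (List Char)) (i : Nat) (hi : i < ws.length)
    (hi' : i < (abbrevRec ws).length) :
    (abbrevRec ws)[i] =
      if i = ws.length - 1 then ws[i]
      else PySem.List.pyGetD ws[i] 0 ' ' :: ['.'] := by
  induction ws generalizing i with
  | nil => simp at hi
  | cons w rest ih =>
    cases rest with
    | nil =>
      have h0 : i = 0 := by simp at hi; omega
      subst h0
      simp [abbrevRec]
    | cons v t =>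
      cases i with
      | zero => simp [abbrevRec]
      | succ j =>
        have hj : j < (v :: t).length := by simpa using hi
        have hj' : j < (abbrevRec (v :: t)).length := by
          rw [abbrevRec_length]; exact hj
        have := ih j hj hj'
        simp only [abbrevRec, List.getElem_cons_succ]
        rw [this]
        simp only [List.length_cons]
        split_ifs with h1 h2 h2 <;> first | rfl | omega

theorem join_lists_congr (a b : List (List Char)) (h : a = b) :
    String.ofList (PySem.Chars.join [' '] a) = String.ofList (PySem.Chars.join [' '] b) := by
  rw [h]

-- ===== VERDICT (by name: the statement is the Claim_ definition above) =====
theorem answer_spec : Claim_equal_answer := by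
  intro name _
  unfold Spec_answer answer answer_alt
  simp only []
  set ws := PySem.Chars.split₀ name.toList with hws
  set n := ws.length with hn
  rw [PySem.List.pyRange_zero_natCast, List.foldl_map]
  rw [show (fun (x : List (List Char)) (k : Nat) =>
        if (k : Int) ≠ 0 ∧ (k : Int) ≠ (n : Int) - 1 then
          x ++ [PySem.List.pyGetD (PySem.List.pyGetD ws (k : Int) []) 0 ' ' :: ['.']]
        else x ++ [PySem.List.pyGetD ws (k : Int) []])
      = fun (x : List (List Char)) (k : Nat) => x ++ [if (k : Int) ≠ 0 ∧ (k : Int) ≠ (n : Int) - 1 then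
          PySem.List.pyGetD (PySem.List.pyGetD ws (k : Int) []) 0 ' ' :: ['.']
        else PySem.List.pyGetD ws (k : Int) []] from by funext x k; split <;> rfl]
  rw [PySem.List.foldl_append_singleton_eq_map]
  rw [List.nil_append]
  cases hcase : ws with
  | nil =>
    rw [hcase] at hn
    simp [hn, PySem.Chars.join, List.intercalate]
  | cons head rest =>
    have hnpos : n = rest.length + 1 := by rw [hn, hcase]; rfl
    apply join_lists_congr
    apply List.ext_getElem
    · simp [abbrevRec_length]; omega
    · intro i hi1 hi2
      simp only [List.length_map, List.length_range] at hi1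
      simp only [List.getElem_map, List.getElem_range]
      have hiws : i < ws.length := by rw [← hn]; exact hi1
      cases i with
      | zero =>
        rw [if_neg (by simp)]
        simp [PySem.List.pyGetD_natCast, hcase, List.getD_eq_getElem?_getD]
      | succ j =>
        have hj : j < rest.length := by omega
        have hj' : j < (abbrevRec rest).length := by rw [abbrevRec_length]; exact hj
        simp only [List.getElem_cons_succ]
        rw [abbrevRec_getElem rest j hj hj']
        have hget : PySem.List.pyGetD (head :: rest) ((j + 1 : Nat) : Int) [] = rest[j] := by
          rw [PySem.List.pyGetD_natCast]
          simp [List.getD_eq_getElem?_getD, List.getElem?_eq_getElem hj]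
        by_cases hlast : j = rest.length - 1
        · rw [if_pos hlast, if_neg (by simp; intro _; omega)]
          rw [hget]
        · rw [if_neg hlast, if_pos (by constructor <;> omega)]
          rw [hget]
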